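-- pv_equiv track=rewrite | github.com/VTEX-US-SE/agent-catalog-importer | vtex_agent/agents/vtex_specification_agent.py | format_assessment_preview
-- ===== SOURCE A (Python) =====
-- from typing import Any, Dict, List, Optional
--
-- def format_assessment_preview(assessment: Dict[str, Any]) -> str:
--     rows = assessment.get("validation_tree", [])
--     by_dept: Dict[str, List[Dict[str, Any]]] = {}
--     for row in rows:
--         by_dept.setdefault(row.get("DepartmentName", "Unknown"), []).append(row)
--     lines = ["### Specifications"]
--     for dept_name in sorted(by_dept.keys()):
--         lines.append(f"- {dept_name}")
--         for row in by_dept[dept_name]: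
--             label = row["Field_Name"]
--             if row.get("IsSKUSelector"):
--                 label += " (SKU selector)"
--             lines.append(f"-- {label}")
--     if len(lines) == 1:
--         lines.append("- No specifications found")
--     return "\n".join(lines)
-- ===== SOURCE B (Python) =====
-- def format_assessment_preview(assessment):
--     rows = assessment.get("validation_tree", [])
--     ordered = sorted(rows, key=lambda row: row.get("DepartmentName", "Unknown"))
--     lines = ["### Specifications"]
--     current = None
--     for row in ordered:
--         dept = row.get("DepartmentName", "Unknown")
--         if dept != current:
--             lines.append(f"- {dept}")
--             current = dept
--         label = row["Field_Name"]
--         if row.get("IsSKUSelector"):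
--             label += " (SKU selector)"
--         lines.append(f"-- {label}")
--     if len(lines) == 1:
--         lines.append("- No specifications found")
--     return "\n".join(lines)
-- ===== Notes on version B (the rewrite author's own statement) =====
-- stated objective: alternative
-- what changed: Replaces A's dict-of-lists grouping followed by iteration over sorted keys with a stable sort of the rows by department name and a single linear pass that emits a header line whenever the department changes.
import Mathlib
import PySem

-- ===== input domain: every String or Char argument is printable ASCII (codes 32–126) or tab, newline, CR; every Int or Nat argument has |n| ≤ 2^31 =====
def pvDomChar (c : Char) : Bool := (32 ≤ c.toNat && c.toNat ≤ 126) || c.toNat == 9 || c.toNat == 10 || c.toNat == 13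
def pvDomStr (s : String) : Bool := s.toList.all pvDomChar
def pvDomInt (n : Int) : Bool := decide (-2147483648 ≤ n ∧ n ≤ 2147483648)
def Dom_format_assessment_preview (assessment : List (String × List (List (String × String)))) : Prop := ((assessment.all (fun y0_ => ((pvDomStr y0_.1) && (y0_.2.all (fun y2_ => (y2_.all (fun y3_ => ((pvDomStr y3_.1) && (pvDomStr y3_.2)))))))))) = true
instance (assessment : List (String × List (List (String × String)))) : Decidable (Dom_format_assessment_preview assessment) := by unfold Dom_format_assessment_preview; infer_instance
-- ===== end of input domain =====

-- B replaces A's dict-of-lists grouping by a stable sort of the rows on the department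
-- name followed by one linear pass that emits a header whenever the department changes
-- (objective: alternative decomposition, same output). Equivalence is about the return
-- value; neither program mutates its argument.

-- Shared row helpers: both Pythons contain these exact expressions
-- (row.get("DepartmentName", "Unknown") and the label formatting lines).
def pvRowDept (row : List (String × String)) : String :=
  (PySem.Dict.mk row).getD "DepartmentName" "Unknown"

-- row["Field_Name"] raises KeyError when absent; Pre_ excludes that, so the default "" is never read.
def pvRowLine (row : List (String × String)) : String :=
  let label := (PySem.Dict.mk row).getD "Field_Name" ""
  "-- " ++ (if (PySem.Dict.mk row).getD "IsSKUSelector" "" ≠ "" then label ++ " (SKU selector)" else label)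

-- ===== PORT A =====
def format_assessment_preview (assessment : List (String × List (List (String × String)))) : String :=
  let rows := (PySem.Dict.mk assessment).getD "validation_tree" []
  let byDept := rows.foldl (fun d row => d.modify (pvRowDept row) [] (fun v => v ++ [row])) PySem.Dict.empty
  let lines := (PySem.List.sorted byDept.keys (fun k => k)).foldl
      (fun lines dept =>
        (byDept.getD dept []).foldl (fun ls row => ls ++ [pvRowLine row]) (lines ++ ["- " ++ dept]))
      ["### Specifications"]
  let lines := if lines.length == 1 then lines ++ ["- No specifications found"] else lines
  PySem.Str.join "\n" lines

-- ===== PORT B =====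
-- loop body of B's single pass: state = (lines so far, current department)
def pvStep (st : List String × Option String) (row : List (String × String)) : List String × Option String :=
  let dept := pvRowDept row
  let st := if some dept ≠ st.2 then (st.1 ++ ["- " ++ dept], some dept) else st
  (st.1 ++ [pvRowLine row], st.2)

def format_assessment_preview_alt (assessment : List (String × List (List (String × String)))) : String :=
  let rows := (PySem.Dict.mk assessment).getD "validation_tree" []
  let ordered := PySem.List.sorted rows pvRowDept
  let st := ordered.foldl pvStep (["### Specifications"], none)
  let lines := if st.1.length == 1 then st.1 ++ ["- No specifications found"] else st.1
  PySem.Str.join "\n" lines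

-- ===== PRECONDITION & SPEC =====
-- Pre_ excludes exactly the inputs where Python A raises KeyError: a row in the
-- validation tree without a "Field_Name" key.
def Pre_format_assessment_preview (assessment : List (String × List (List (String × String)))) : Prop :=
  ∀ row ∈ (PySem.Dict.mk assessment).getD "validation_tree" [],
    (PySem.Dict.mk row).contains "Field_Name" = true
instance (assessment : List (String × List (List (String × String)))) : Decidable (Pre_format_assessment_preview assessment) := by unfold Pre_format_assessment_preview; infer_instance

def pvWitness_format_assessment_preview : (List (String × List (List (String × String)))) :=
  [("validation_tree",
    [[("Field_Name", "Color"), ("DepartmentName", "Apparel")],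
     [("Field_Name", "Size"), ("IsSKUSelector", "true")]])]

def Spec_format_assessment_preview (assessment : List (String × List (List (String × String)))) (out : String) : Prop := out = format_assessment_preview_alt assessment
instance (assessment : List (String × List (List (String × String)))) (out : String) : Decidable (Spec_format_assessment_preview assessment out) := by unfold Spec_format_assessment_preview; infer_instance

-- ===== CLAIM (what is proved, stated in full; the proofs are below) =====
def Claim_equal_format_assessment_preview : Prop := ∀ (assessment : List (String × List (List (String × String)))), Dom_format_assessment_preview assessment → Pre_format_assessment_preview assessment → Spec_format_assessment_preview assessment (format_assessment_preview assessment)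

-- ===== LEMMAS AND PROOFS =====

-- the rows of `rows` grouped by key, in the block order given by K
def pvGroups {α : Type} (key : α → String) (K : List String) (rows : List α) : List α :=
  K.flatMap (fun k => rows.filter (fun x => key x == k))

theorem pv_ofList_app_mem {α : Type} [BEq α] [LawfulBEq α] (l : List α) (x : α) (h : x ∈ l) :
    PySem.Set.ofList (l ++ [x]) = PySem.Set.ofList l := by
  simp [PySem.Set.ofList, PySem.Set.add, PySem.Set.empty, List.foldl_append]
  exact (PySem.Set.mem_ofList l x).mpr h

theorem pv_ofList_app_not_mem {α : Type} [BEq α] [LawfulBEq α] (l : List α) (x : α) (h : x ∉ l) :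
    PySem.Set.ofList (l ++ [x]) = PySem.Set.ofList l ++ [x] := by
  simp [PySem.Set.ofList, PySem.Set.add, PySem.Set.empty, List.foldl_append]
  intro h2
  exact absurd ((PySem.Set.mem_ofList l x).mp (by simpa [PySem.Set.ofList, PySem.Set.empty] using h2)) h

theorem pv_sorted_app {α κ : Type} [LT κ] [DecidableLT κ] (xs : List α) (x : α) (key : α → κ) :
    PySem.List.sorted (xs ++ [x]) key
      = PySem.List.insertBy (fun a b => decide (key a < key b)) x (PySem.List.sorted xs key) := by
  rw [PySem.List.sorted_eq_foldl_insertBy, PySem.List.sorted_eq_foldl_insertBy, List.foldl_append]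
  rfl

theorem pv_insertBy_skip {α : Type} (before : α → α → Bool) (x : α) (pre ys : List α)
    (h : ∀ y ∈ pre, before x y = false) :
    PySem.List.insertBy before x (pre ++ ys) = pre ++ PySem.List.insertBy before x ys := by
  induction pre with
  | nil => rfl
  | cons p t ih =>
    simp only [List.cons_append, PySem.List.insertBy, h p (by simp)]
    simp [ih (fun y hy => h y (by simp [hy]))]

theorem pv_insertBy_front {α : Type} (before : α → α → Bool) (x : α) (ys : List α)
    (h : ∀ y ∈ ys, before x y = true) :
    PySem.List.insertBy before x ys = x :: ys := by
  cases ys with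
  | nil => rfl
  | cons y t => simp [PySem.List.insertBy, h y (by simp)]

theorem pv_groups_snoc_ne {α : Type} (key : α → String) (K : List String) (rows : List α) (r : α)
    (h : ∀ k ∈ K, key r ≠ k) :
    pvGroups key K (rows ++ [r]) = pvGroups key K rows := by
  induction K with
  | nil => rfl
  | cons k K' ih =>
    simp only [pvGroups, List.flatMap_cons] at *
    rw [List.filter_append, ih (fun k' hk' => h k' (by simp [hk']))]
    simp [h k (by simp)]

theorem pv_insert_groups_mem {α : Type} (key : α → String) (K : List String) (rows : List α) (r : α)
    (hK : K.Pairwise (· < ·)) (hmem : key r ∈ K) :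
    PySem.List.insertBy (fun a b => decide (key a < key b)) r (pvGroups key K rows)
      = pvGroups key K (rows ++ [r]) := by
  induction K with
  | nil => simp at hmem
  | cons k K' ih =>
    obtain ⟨hk, hK'⟩ := List.pairwise_cons.mp hK
    have hpre : ∀ y ∈ rows.filter (fun x => key x == k), (fun a b => decide (key a < key b)) r y = false := by
      intro y hy
      have hky : key y = k := by simpa using (List.mem_filter.mp hy).2
      by_cases h : key r = k
      · simp [hky, h]
      · have : k < key r := hk _ ((List.mem_cons.mp hmem).resolve_left h)
        show decide (key r < key y) = false
        rw [hky]; exact decide_eq_false (lt_asymm this)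
    simp only [pvGroups, List.flatMap_cons] at *
    rw [pv_insertBy_skip _ _ _ _ hpre]
    by_cases h : key r = k
    · have hrest : ∀ y ∈ pvGroups key K' rows, (fun a b => decide (key a < key b)) r y = true := by
        intro y hy
        obtain ⟨k', hk', hy'⟩ := List.mem_flatMap.mp hy
        have hky : key y = k' := by simpa using (List.mem_filter.mp hy').2
        show decide (key r < key y) = true
        rw [hky, h]; exact decide_eq_true (hk _ hk')
      rw [pv_insertBy_front _ _ _ hrest]
      have hsn := pv_groups_snoc_ne key K' rows r (fun k' hk' => by rw [h]; exact ne_of_lt (hk _ hk'))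
      simp only [pvGroups] at hsn
      rw [List.filter_append, hsn]
      simp [h]
    · have hmem' : key r ∈ K' := (List.mem_cons.mp hmem).resolve_left h
      rw [ih hK' hmem', List.filter_append]
      simp [h]

theorem pv_insert_groups_not_mem {α : Type} (key : α → String) (K : List String) (rows : List α) (r : α)
    (hK : K.Pairwise (· < ·)) (hnotK : key r ∉ K) (hno : ∀ x ∈ rows, key x ≠ key r) :
    PySem.List.insertBy (fun a b => decide (key a < key b)) r (pvGroups key K rows)
      = pvGroups key (PySem.List.insertBy (fun a b => decide (a < b)) (key r) K) (rows ++ [r]) := by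
  induction K with
  | nil =>
    simp only [pvGroups, List.flatMap_nil, List.flatMap_cons, List.flatMap_nil, List.append_nil,
      PySem.List.insertBy]
    rw [List.filter_append]
    have : rows.filter (fun x => key x == key r) = [] :=
      List.filter_eq_nil_iff.mpr (fun x hx => by simp [hno x hx])
    simp [this]
  | cons k K' ih =>
    obtain ⟨hk, hK'⟩ := List.pairwise_cons.mp hK
    have hne : key r ≠ k := fun h => hnotK (h ▸ List.mem_cons_self ..)
    by_cases hlt : key r < k
    · have hfront : ∀ y ∈ pvGroups key (k :: K') rows, (fun a b => decide (key a < key b)) r y = true := by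
        intro y hy
        obtain ⟨k', hk', hy'⟩ := List.mem_flatMap.mp hy
        have hky : key y = k' := by simpa using (List.mem_filter.mp hy').2
        show decide (key r < key y) = true
        rw [hky]
        rcases List.mem_cons.mp hk' with h' | h'
        · exact decide_eq_true (h' ▸ hlt)
        · exact decide_eq_true (lt_trans hlt (hk _ h'))
      rw [pv_insertBy_front _ _ _ hfront]
      have hkeys : PySem.List.insertBy (fun a b => decide (a < b)) (key r) (k :: K') = key r :: k :: K' := by
        simp [PySem.List.insertBy, hlt]
      rw [hkeys]
      have hsn := pv_groups_snoc_ne key (k :: K') rows r (by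
        intro k'' hk''
        rcases List.mem_cons.mp hk'' with h' | h'
        · exact h' ▸ ne_of_lt hlt
        · exact ne_of_lt (lt_trans hlt (hk _ h')))
      simp only [pvGroups, List.flatMap_cons] at *
      rw [List.filter_append, hsn]
      have : rows.filter (fun x => key x == key r) = [] :=
        List.filter_eq_nil_iff.mpr (fun x hx => by simp [hno x hx])
      simp [this]
    · have hgt : k < key r := lt_of_le_of_ne (not_lt.mp hlt) (Ne.symm hne)
      have hpre : ∀ y ∈ rows.filter (fun x => key x == k), (fun a b => decide (key a < key b)) r y = false := by
        intro y hy
        have hky : key y = k := by simpa using (List.mem_filter.mp hy).2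
        show decide (key r < key y) = false
        rw [hky]; exact decide_eq_false (lt_asymm hgt)
      have hkeys : PySem.List.insertBy (fun a b => decide (a < b)) (key r) (k :: K')
          = k :: PySem.List.insertBy (fun a b => decide (a < b)) (key r) K' := by
        simp [PySem.List.insertBy, hlt]
      rw [hkeys]
      have hih := ih hK' (fun h => hnotK (List.mem_cons_of_mem _ h))
      simp only [pvGroups, List.flatMap_cons] at *
      rw [pv_insertBy_skip _ _ _ _ hpre, hih, List.filter_append]
      simp [hne]
theorem pv_sorted_groups {α : Type} (key : α → String) (rows : List α) :
    PySem.List.sorted rows key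
      = pvGroups key (PySem.List.sorted (PySem.Set.ofList (rows.map key)) (fun k => k)) rows := by
  induction rows using List.reverseRecOn with
  | nil => rfl
  | append_singleton rows r ih =>
    rw [pv_sorted_app, ih, List.map_append, List.map_cons, List.map_nil]
    by_cases hm : key r ∈ rows.map key
    · rw [pv_ofList_app_mem _ _ hm]
      exact pv_insert_groups_mem key _ rows r
        (PySem.List.sorted_ofList_pairwise_lt _)
        ((PySem.List.mem_sorted _ _ _ _).mpr ((PySem.Set.mem_ofList _ _).mpr hm))
    · rw [pv_ofList_app_not_mem _ _ hm, pv_sorted_app]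
      exact pv_insert_groups_not_mem key _ rows r
        (PySem.List.sorted_ofList_pairwise_lt _)
        (fun h => hm ((PySem.Set.mem_ofList _ _).mp ((PySem.List.mem_sorted _ _ _ _).mp h)))
        (fun x hx h => hm (h ▸ List.mem_map_of_mem hx))
theorem pv_keys_byDept (rows : List (List (String × String))) :
    (rows.foldl (fun d row => d.modify (pvRowDept row) [] (fun v => v ++ [row])) PySem.Dict.empty).keys
      = PySem.Set.ofList (rows.map pvRowDept) := by
  rw [PySem.Dict.keys_foldl_modify_key rows pvRowDept [] (fun _ row v => v ++ [row]), PySem.Dict.keys_empty]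
  rfl

theorem pv_getD_byDept (rows : List (List (String × String))) (k : String) :
    (rows.foldl (fun d row => d.modify (pvRowDept row) [] (fun v => v ++ [row])) PySem.Dict.empty).getD k []
      = rows.filter (fun r => pvRowDept r == k) := by
  have h1 : rows.foldl (fun d row => d.modify (pvRowDept row) [] (fun v => v ++ [row])) PySem.Dict.empty
      = (rows.map (fun r => (pvRowDept r, r))).foldl (fun d p => d.modify p.1 [] (fun v => v ++ [p.2])) PySem.Dict.empty := by
    rw [List.foldl_map]
  rw [h1, PySem.Dict.getD_foldl_modify_append, List.filter_map]
  simp [Function.comp_def, PySem.Dict.getD_empty]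

theorem pv_scan_block (blk : List (List (String × String))) (ls : List String) (k : String)
    (h : ∀ x ∈ blk, pvRowDept x = k) :
    blk.foldl pvStep (ls, some k) = (ls ++ blk.map pvRowLine, some k) := by
  induction blk generalizing ls with
  | nil => simp
  | cons b t ih =>
    have hb : pvStep (ls, some k) b = (ls ++ [pvRowLine b], some k) := by
      simp [pvStep, h b (by simp)]
    rw [List.foldl_cons, hb, ih _ (fun x hx => h x (by simp [hx]))]
    simp

theorem pv_scan_groups (K : List String) (rows : List (List (String × String)))
    (ls : List String) (cur : Option String)
    (hK : K.Pairwise (· < ·)) (hcur : ∀ k ∈ K, cur ≠ some k)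
    (hne : ∀ k ∈ K, ∃ x ∈ rows, pvRowDept x = k) :
    ∃ c, (pvGroups pvRowDept K rows).foldl pvStep (ls, cur)
      = (ls ++ K.flatMap (fun k => ("- " ++ k) :: (rows.filter (fun x => pvRowDept x == k)).map pvRowLine), c) := by
  induction K generalizing ls cur with
  | nil => exact ⟨cur, by simp [pvGroups]⟩
  | cons k K' ih =>
    obtain ⟨hk, hK'⟩ := List.pairwise_cons.mp hK
    cases hfl : rows.filter (fun x => pvRowDept x == k) with
    | nil =>
      obtain ⟨x, hx, hkx⟩ := hne k (by simp)
      have : x ∈ rows.filter (fun x => pvRowDept x == k) := List.mem_filter.mpr ⟨hx, by simp [hkx]⟩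
      rw [hfl] at this; simp at this
    | cons b t =>
      have hbmem : ∀ x ∈ b :: t, pvRowDept x = k := by
        intro x hx
        have : x ∈ rows.filter (fun x => pvRowDept x == k) := hfl ▸ hx
        simpa using (List.mem_filter.mp this).2
      have hstep : pvStep (ls, cur) b = ((ls ++ ["- " ++ k]) ++ [pvRowLine b], some k) := by
        have hck : some k ≠ cur := Ne.symm (hcur k (by simp))
        simp [pvStep, hbmem b (by simp), hck]
      have hgr : pvGroups pvRowDept (k :: K') rows = (b :: t) ++ pvGroups pvRowDept K' rows := by
        simp [pvGroups, hfl]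
      rw [hgr, List.foldl_append, List.foldl_cons, hstep,
        pv_scan_block t _ k (fun x hx => hbmem x (by simp [hx]))]
      obtain ⟨c, hc⟩ := ih (hK := hK')
        (hcur := fun k' hk' h => by cases h; exact absurd rfl (ne_of_lt (hk _ hk')))
        (hne := fun k' hk' => hne k' (by simp [hk']))
        (ls := (ls ++ ["- " ++ k] ++ [pvRowLine b]) ++ t.map pvRowLine) (cur := some k)
      refine ⟨c, ?_⟩
      rw [hc]
      simp [hfl]

-- ===== VERDICT (by name: the statement is the Claim_ definition above) =====
theorem format_assessment_preview_spec : Claim_equal_format_assessment_preview := by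
  intro assessment _hdom _hpre
  show format_assessment_preview assessment = format_assessment_preview_alt assessment
  simp only [format_assessment_preview, format_assessment_preview_alt]
  rw [pv_keys_byDept]
  simp only [pv_getD_byDept]
  simp only [PySem.List.foldl_append_singleton_eq_map, List.append_assoc]
  rw [PySem.List.foldl_append_eq_flatMap, pv_sorted_groups pvRowDept]
  obtain ⟨c, hc⟩ := pv_scan_groups
    (PySem.List.sorted (PySem.Set.ofList (((PySem.Dict.mk assessment).getD "validation_tree" []).map pvRowDept)) (fun k => k))
    ((PySem.Dict.mk assessment).getD "validation_tree" [])
    ["### Specifications"] none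
    (PySem.List.sorted_ofList_pairwise_lt _)
    (fun k _ => by simp)
    (fun k hk => List.mem_map.mp ((PySem.Set.mem_ofList _ _).mp ((PySem.List.mem_sorted _ _ _ _).mp hk)))
  rw [hc]
  simp
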